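-- pv_equiv track=rewrite | github.com/NeshSab/ai_interview_app_streamlit | app/app.py | extract_last_qa_old
-- ===== SOURCE A (Python) =====
-- def extract_last_qa_old(history: list[dict[str, str]]) -> tuple[str, str]:
--     """
--     Return (last_question_from_assistant, last_user_answer) from the history.
--     If not present, returns ("", "").
--     """
--     last_user = ""
--     last_assistant = ""
--
--     for m in reversed(history or []):
--         role = m.get("role")
--         if not last_user and role == "user":
--             last_user = (m.get("content") or "").strip()
--         elif not last_assistant and role == "assistant":
--             last_assistant = (m.get("content") or "").strip()
--         if last_user and last_assistant:
--             break
--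
--     if last_assistant and not last_assistant.endswith("?"):
--         for m in reversed(history or []):
--             if m.get("role") == "assistant":
--                 txt = (m.get("content") or "").strip()
--                 if txt.endswith("?"):
--                     last_assistant = txt
--                     break
--     return last_assistant, last_user
-- ===== SOURCE B (Python) =====
-- def extract_last_qa_old(history: list[dict[str, str]]) -> tuple[str, str]:
--     """
--     Return (last_question_from_assistant, last_user_answer) from the history.
--     If not present, returns ("", "").
--     """
--     last_user = ""
--     last_assistant_any = ""
--     last_assistant_q = ""
--     for m in (history or []):
--         role = m.get("role")
--         s = (m.get("content") or "").strip()
--         if not s: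
--             continue
--         if role == "user":
--             last_user = s
--         elif role == "assistant":
--             last_assistant_any = s
--             if s.endswith("?"):
--                 last_assistant_q = s
--     last_assistant = last_assistant_q if last_assistant_q else last_assistant_any
--     return last_assistant, last_user
-- ===== Notes on version B (the rewrite author's own statement) =====
-- stated objective: simpler
-- what changed: A's reverse short-circuit scan plus a conditional second reverse scan for a '?'-ending assistant message are replaced by one unconditional forward pass maintaining three accumulators (last user, last assistant, last assistant question), combined at the end.
import Mathlib
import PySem

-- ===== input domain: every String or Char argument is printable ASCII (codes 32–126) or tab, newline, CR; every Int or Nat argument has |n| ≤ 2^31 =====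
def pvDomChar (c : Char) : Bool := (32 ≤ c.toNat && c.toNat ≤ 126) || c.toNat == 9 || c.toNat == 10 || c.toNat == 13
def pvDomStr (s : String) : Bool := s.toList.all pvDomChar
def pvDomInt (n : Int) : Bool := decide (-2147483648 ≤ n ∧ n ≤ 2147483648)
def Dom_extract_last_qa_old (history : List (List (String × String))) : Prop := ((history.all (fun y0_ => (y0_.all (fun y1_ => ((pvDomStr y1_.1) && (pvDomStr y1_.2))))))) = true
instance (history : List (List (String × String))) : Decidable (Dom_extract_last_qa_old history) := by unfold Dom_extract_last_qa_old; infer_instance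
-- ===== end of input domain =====

-- B replaces A's reverse short-circuit scan plus conditional second reverse scan by ONE
-- unconditional forward pass over three accumulators (objective: simpler decomposition).

-- shared message accessors: m.get("role") and (m.get("content") or "").strip()
def pvRole (m : List (String × String)) : Option String := (PySem.Dict.mk m).get? "role"
def pvContent (m : List (String × String)) : String :=
  PySem.Str.strip ((PySem.Dict.mk m).getD "content" "")

-- ===== PORT A =====
-- first reverse loop with its break: state (last_user, last_assistant)
def pvLoopA1 : List (List (String × String)) → String → String → String × String
  | [], lu, la => (lu, la)
  | m :: rest, lu, la =>
    let st :=
      if lu = "" ∧ pvRole m = some "user" then (pvContent m, la)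
      else if la = "" ∧ pvRole m = some "assistant" then (lu, pvContent m)
      else (lu, la)
    if st.1 ≠ "" ∧ st.2 ≠ "" then st else pvLoopA1 rest st.1 st.2

-- second reverse loop: look for the last assistant message ending in "?"
def pvLoopA2 : List (List (String × String)) → String → String
  | [], la => la
  | m :: rest, la =>
    if pvRole m = some "assistant" then
      let txt := pvContent m
      if PySem.Str.endswith txt "?" then txt else pvLoopA2 rest la
    else pvLoopA2 rest la

def extract_last_qa_old (history : List (List (String × String))) : String × String :=
  let st := pvLoopA1 history.reverse "" ""
  let la :=
    if st.2 ≠ "" ∧ PySem.Str.endswith st.2 "?" = false then pvLoopA2 history.reverse st.2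
    else st.2
  (la, st.1)

-- ===== PORT B =====
-- one forward step over the state (last_user, last_assistant_any, last_assistant_q)
def pvStepB (st : String × String × String) (m : List (String × String)) :
    String × String × String :=
  let s := pvContent m
  if s = "" then st
  else if pvRole m = some "user" then (s, st.2.1, st.2.2)
  else if pvRole m = some "assistant" then
    (st.1, s, if PySem.Str.endswith s "?" then s else st.2.2)
  else st

def extract_last_qa_old_alt (history : List (List (String × String))) : String × String :=
  let st := history.foldl pvStepB ("", "", "")
  ((if st.2.2 ≠ "" then st.2.2 else st.2.1), st.1)

-- ===== PRECONDITION & SPEC =====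
def Spec_extract_last_qa_old (history : List (List (String × String))) (out : String × String) : Prop := out = extract_last_qa_old_alt history
instance (history : List (List (String × String))) (out : String × String) : Decidable (Spec_extract_last_qa_old history out) := by unfold Spec_extract_last_qa_old; infer_instance

-- ===== CLAIM (what is proved, stated in full; the proofs are below) =====
def Claim_equal_extract_last_qa_old : Prop := ∀ (history : List (List (String × String))), Dom_extract_last_qa_old history → Spec_extract_last_qa_old history (extract_last_qa_old history)

-- ===== LEMMAS AND PROOFS =====

-- selectors: the payload a message contributes to each of the three accumulators
def pvFU (m : List (String × String)) : Option String :=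
  if pvRole m = some "user" ∧ pvContent m ≠ "" then some (pvContent m) else none
def pvFA (m : List (String × String)) : Option String :=
  if pvRole m = some "assistant" ∧ pvContent m ≠ "" then some (pvContent m) else none
def pvFQ (m : List (String × String)) : Option String :=
  if pvRole m = some "assistant" ∧ PySem.Str.endswith (pvContent m) "?" = true
  then some (pvContent m) else none

def pvFind (f : List (String × String) → Option String)
    (l : List (List (String × String))) : Option String := (l.filterMap f).head?

theorem pv_ends_ne_empty {s : String} (h : PySem.Str.endswith s "?" = true) : s ≠ "" := by
  intro he; subst he; revert h; decide

theorem pvFind_nil (f : List (String × String) → Option String) : pvFind f [] = none := rfl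

theorem pvFind_cons (f : List (String × String) → Option String) (m : List (String × String))
    (l : List (List (String × String))) :
    pvFind f (m :: l) = ((f m).or (pvFind f l)) := by
  simp [pvFind, List.filterMap_cons]
  cases f m <;> simp

theorem pvFind_append (f : List (String × String) → Option String)
    (xs ys : List (List (String × String))) :
    pvFind f (xs ++ ys) = ((pvFind f xs).or (pvFind f ys)) := by
  induction xs with
  | nil => simp [pvFind]
  | cons m rest ih =>
    rw [List.cons_append, pvFind_cons, pvFind_cons, ih]
    cases f m <;> rfl

theorem pv_loopA1_eq (l : List (List (String × String))) :
    ∀ lu la, pvLoopA1 l lu la =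
      ((if lu = "" then (pvFind pvFU l).getD "" else lu),
       (if la = "" then (pvFind pvFA l).getD "" else la)) := by
  induction l with
  | nil => intro lu la; simp [pvLoopA1, pvFind_nil]
  | cons m rest ih =>
    intro lu la
    by_cases hlu : lu = "" <;> by_cases hla : la = "" <;>
      by_cases hru : pvRole m = some "user" <;>
      by_cases hra : pvRole m = some "assistant" <;>
      by_cases hc : pvContent m = "" <;>
      simp_all [pvLoopA1, pvFind_cons, pvFU, pvFA]

theorem pv_loopA2_eq (l : List (List (String × String))) :
    ∀ la, pvLoopA2 l la = (pvFind pvFQ l).getD la := by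
  induction l with
  | nil => intro la; simp [pvLoopA2, pvFind_nil]
  | cons m rest ih =>
    intro la
    by_cases hra : pvRole m = some "assistant" <;>
      by_cases hq : PySem.Str.endswith (pvContent m) "?" = true <;>
      simp_all [pvLoopA2, pvFind_cons, pvFQ]

theorem pv_stepB_eq (st : String × String × String) (m : List (String × String)) :
    pvStepB st m = ((pvFU m).getD st.1, (pvFA m).getD st.2.1, (pvFQ m).getD st.2.2) := by
  by_cases hc : pvContent m = ""
  · have hq : PySem.Chars.endswith ([] : List Char) ['?'] = false := by decide
    simp [pvStepB, pvFU, pvFA, pvFQ, hc, hq]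
  · by_cases hru : pvRole m = some "user" <;> by_cases hra : pvRole m = some "assistant" <;>
      by_cases hq : PySem.Str.endswith (pvContent m) "?" = true <;>
      simp_all [pvStepB, pvFU, pvFA, pvFQ]

theorem pv_foldB_eq (l : List (List (String × String))) :
    ∀ st : String × String × String, l.foldl pvStepB st =
      ((pvFind pvFU l.reverse).getD st.1,
       (pvFind pvFA l.reverse).getD st.2.1,
       (pvFind pvFQ l.reverse).getD st.2.2) := by
  induction l with
  | nil => intro st; simp [pvFind_nil]
  | cons m rest ih =>
    intro st
    have h1 : List.foldl pvStepB st (m :: rest) = List.foldl pvStepB (pvStepB st m) rest := rfl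
    rw [h1, ih]
    have hrev : (m :: rest).reverse = rest.reverse ++ [m] := by simp
    rw [hrev, pvFind_append, pvFind_append, pvFind_append, pv_stepB_eq]
    have hm : ∀ f : List (String × String) → Option String, pvFind f [m] = f m := by
      intro f; rw [pvFind_cons, pvFind_nil]; cases f m <;> rfl
    rw [hm, hm, hm]
    cases hu : pvFind pvFU rest.reverse <;> cases ha : pvFind pvFA rest.reverse <;>
      cases hq : pvFind pvFQ rest.reverse <;> simp

-- whenever a "?" answer is found, some assistant answer is found, and if the latest
-- assistant answer itself ends in "?" the two coincide
theorem pv_key (l : List (List (String × String))) :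
    ∀ t, pvFind pvFQ l = some t →
      PySem.Str.endswith t "?" = true ∧
      ∃ u, pvFind pvFA l = some u ∧ u ≠ "" ∧
        (PySem.Str.endswith u "?" = true → t = u) := by
  induction l with
  | nil => intro t ht; simp [pvFind_nil] at ht
  | cons m rest ih =>
    intro t ht
    rw [pvFind_cons] at ht
    by_cases hra : pvRole m = some "assistant"
    · by_cases hq : PySem.Str.endswith (pvContent m) "?" = true
      · have hq' := hq; simp at hq'
        have : pvFQ m = some (pvContent m) := by simp [pvFQ, hra, hq']
        rw [this] at ht
        simp at ht
        subst ht
        refine ⟨hq, pvContent m, ?_, pv_ends_ne_empty hq, fun _ => rfl⟩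
        rw [pvFind_cons]
        have : pvFA m = some (pvContent m) := by simp [pvFA, hra, pv_ends_ne_empty hq]
        simp [this]
      · have hq' := hq; simp at hq'
        have hfq : pvFQ m = none := by simp [pvFQ, hq']
        rw [hfq] at ht; simp at ht
        obtain ⟨ht', u, hu, hune, himp⟩ := ih t ht
        by_cases hc : pvContent m = ""
        · have : pvFA m = none := by simp [pvFA, hc]
          exact ⟨ht', u, by rw [pvFind_cons, this]; simpa, hune, himp⟩
        · have : pvFA m = some (pvContent m) := by simp [pvFA, hra, hc]
          refine ⟨ht', pvContent m, by rw [pvFind_cons, this]; rfl, hc, ?_⟩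
          intro h; exact absurd h hq
    · have hfq : pvFQ m = none := by simp [pvFQ, hra]
      have hfa : pvFA m = none := by simp [pvFA, hra]
      rw [hfq] at ht; simp at ht
      obtain ⟨ht', u, hu, hune, himp⟩ := ih t ht
      exact ⟨ht', u, by rw [pvFind_cons, hfa]; simpa, hune, himp⟩

-- ===== VERDICT (by name: the statement is the Claim_ definition above) =====
theorem extract_last_qa_old_spec : Claim_equal_extract_last_qa_old := by
  intro h _
  unfold Spec_extract_last_qa_old extract_last_qa_old extract_last_qa_old_alt
  rw [pv_foldB_eq, pv_loopA1_eq]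
  cases hq : pvFind pvFQ h.reverse with
  | none =>
    simp only [hq, pv_loopA2_eq, Option.getD_none]
    split_ifs <;> simp_all
  | some t =>
    obtain ⟨ht, u, hu, hune, himp⟩ := pv_key h.reverse t hq
    have htne : t ≠ "" := pv_ends_ne_empty ht
    simp only [hq, hu, pv_loopA2_eq, Option.getD_some]
    split_ifs <;> simp_all
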